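-- pv_equiv track=rewrite | github.com/Joon7891/Competitive-Programming | ECOO/ECOO '18 R1 P3 - Missing Art.py | execute
-- ===== SOURCE A (Python) =====
-- def build_fail_output(fails):
--     output = 'FAIL: '
--     len_fails = len(fails)
--     for i in range(len_fails):
--         output += str(fails[i]) + (',' if i != len_fails - 1 else '')
--
--     return output
--
-- def execute(even_increase, odd_decrease, zero_set, prevals, postvals):
--     correct_prevals = []
--     for preval in prevals:
--         correct_preval = str()
--         for char in preval:
--             new_char = 0
--             char_int = int(char)
--             if char_int == 0:
--                 new_char = zero_set
--             elif char_int % 2 == 0: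
--                 new_char = char_int + even_increase
--             else:
--                 new_char = max(char_int - odd_decrease, 0)
--
--             correct_preval += str(new_char)
--         correct_prevals.append(correct_preval)
--
--     fails = []
--     for i in range(len(correct_prevals)):
--         if correct_prevals[i] != postvals[i]:
--             fails.append(i+1)
--
--     fails.sort()
--     return 'MATCH' if len(fails) == 0 else build_fail_output(fails)
-- ===== SOURCE B (Python) =====
-- def execute(even_increase, odd_decrease, zero_set, prevals, postvals):
--     def piece(c):
--         d = int(c)
--         if d == 0:
--             return str(zero_set)
--         if d % 2 == 0:
--             return str(d + even_increase)
--         return str(max(d - odd_decrease, 0))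
--
--     def matches(post, pre):
--         # verification scan: peel each digit's expected transformed piece off the
--         # front of the remaining postval; never builds the corrected string
--         rest = post
--         for c in pre:
--             p = piece(c)
--             if not rest.startswith(p):
--                 return False
--             rest = rest[len(p):]
--         return rest == ''
--
--     fails = [str(i + 1) for i, pre in enumerate(prevals) if not matches(postvals[i], pre)]
--     return 'MATCH' if not fails else 'FAIL: ' + ','.join(fails)
-- ===== Notes on version B (the rewrite author's own statement) =====
-- stated objective: alternative
-- what changed: A constructs every corrected string, then runs an index loop comparing them to postvals and sorts the fail list; B never builds a corrected string: it verifies each postval in place by a prefix-consuming scan that peels the expected transformed piece for each digit off the remaining postval (with early exit on the first mismatch), collecting fail indices in one comprehension.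
import Mathlib
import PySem

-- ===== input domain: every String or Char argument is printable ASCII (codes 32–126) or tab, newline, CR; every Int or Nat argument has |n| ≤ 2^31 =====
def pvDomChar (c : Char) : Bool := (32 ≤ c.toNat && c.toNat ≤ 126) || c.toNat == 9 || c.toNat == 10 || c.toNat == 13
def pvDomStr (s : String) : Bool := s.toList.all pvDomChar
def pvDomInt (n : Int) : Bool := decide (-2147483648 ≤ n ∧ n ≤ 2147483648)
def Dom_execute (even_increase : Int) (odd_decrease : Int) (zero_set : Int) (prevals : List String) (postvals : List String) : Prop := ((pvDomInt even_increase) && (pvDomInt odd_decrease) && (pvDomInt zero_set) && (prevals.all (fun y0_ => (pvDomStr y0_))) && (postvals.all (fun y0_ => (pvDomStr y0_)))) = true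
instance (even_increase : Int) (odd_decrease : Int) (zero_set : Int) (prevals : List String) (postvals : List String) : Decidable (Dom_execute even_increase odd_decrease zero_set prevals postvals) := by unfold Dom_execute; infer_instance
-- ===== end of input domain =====

-- B replaces A's construct-then-compare (build all corrected strings, index loop, redundant sort,
-- bespoke comma loop) by an in-place verification scan: each postval is checked by peeling the
-- expected transformed piece per digit off its front; no corrected string is ever built.

-- ===== PORT A =====
def build_fail_output (fails : List Int) : String :=
  (PySem.List.pyRange 0 (PySem.List.len fails) 1).foldl
    (fun output i =>
      output ++ PySem.Int.toStr (PySem.List.pyGetD fails i 0)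
        ++ (if i != PySem.List.len fails - 1 then "," else ""))
    "FAIL: "

def execute (even_increase : Int) (odd_decrease : Int) (zero_set : Int) (prevals : List String) (postvals : List String) : String :=
  let correct_prevals : List String := prevals.foldl (fun acc preval =>
    acc ++ [preval.toList.foldl (fun correct_preval char =>
      let char_int : Int := (PySem.Int.ofChars? [char]).getD 0   -- int(char); Pre_ excludes the ValueError (none) case
      let new_char : Int :=
        if char_int == 0 then zero_set
        else if PySem.Int.mod char_int 2 == 0 then char_int + even_increase
        else max (char_int - odd_decrease) 0
      correct_preval ++ PySem.Int.toStr new_char) ""]) []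
  let fails : List Int := (PySem.List.pyRange 0 (PySem.List.len correct_prevals) 1).foldl
    (fun fails i =>
      if PySem.List.pyGetD correct_prevals i "" != PySem.List.pyGetD postvals i "" then  -- postvals[i]; Pre_ excludes the IndexError case
        fails ++ [i + 1]
      else fails) []
  let fails := PySem.List.sorted fails id false
  if PySem.List.len fails == 0 then "MATCH" else build_fail_output fails

-- ===== PORT B =====
def pvPiece (even_increase : Int) (odd_decrease : Int) (zero_set : Int) (c : Char) : String :=
  let d : Int := (PySem.Int.ofChars? [c]).getD 0   -- int(c); Pre_ excludes the ValueError case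
  if d == 0 then PySem.Int.toStr zero_set
  else if PySem.Int.mod d 2 == 0 then PySem.Int.toStr (d + even_increase)
  else PySem.Int.toStr (max (d - odd_decrease) 0)

-- the 'for c in pre' verification loop with early return, as structural recursion on the chars
def pvMatches (even_increase : Int) (odd_decrease : Int) (zero_set : Int) (rest : String) : List Char → Bool
  | [] => rest == ""
  | c :: cs =>
    let p := pvPiece even_increase odd_decrease zero_set c
    if PySem.Str.startswith rest p then
      pvMatches even_increase odd_decrease zero_set
        (PySem.Str.slice rest (some (PySem.Str.len p)) none) cs
    else false

def execute_alt (even_increase : Int) (odd_decrease : Int) (zero_set : Int) (prevals : List String) (postvals : List String) : String :=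
  let fails : List String := ((PySem.List.enumerate prevals).filter
      (fun pr => !pvMatches even_increase odd_decrease zero_set
        (PySem.List.pyGetD postvals pr.1 "") pr.2.toList)).map   -- postvals[i]; Pre_ excludes the IndexError case
      (fun pr => PySem.Int.toStr (pr.1 + 1))
  if fails.isEmpty then "MATCH" else "FAIL: " ++ PySem.Str.join "," fails

-- ===== PRECONDITION & SPEC =====
-- Pre_ excludes exactly the inputs where A raises: a non-digit character in some preval
-- (ValueError from int(char)) or postvals shorter than prevals (IndexError on postvals[i]).
def Pre_execute (even_increase : Int) (odd_decrease : Int) (zero_set : Int) (prevals : List String) (postvals : List String) : Prop :=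
  (prevals.all (fun s => s.toList.all (fun c => ['0','1','2','3','4','5','6','7','8','9'].contains c))) = true ∧
  prevals.length ≤ postvals.length
instance (even_increase : Int) (odd_decrease : Int) (zero_set : Int) (prevals : List String) (postvals : List String) : Decidable (Pre_execute even_increase odd_decrease zero_set prevals postvals) := by unfold Pre_execute; infer_instance

def pvWitness_execute : Int × Int × Int × List String × List String := (1, 2, 5, ["102", "7"], ["251", "9"])

def Spec_execute (even_increase : Int) (odd_decrease : Int) (zero_set : Int) (prevals : List String) (postvals : List String) (out : String) : Prop := out = execute_alt even_increase odd_decrease zero_set prevals postvals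
instance (even_increase : Int) (odd_decrease : Int) (zero_set : Int) (prevals : List String) (postvals : List String) (out : String) : Decidable (Spec_execute even_increase odd_decrease zero_set prevals postvals out) := by unfold Spec_execute; infer_instance

-- ===== CLAIM (what is proved, stated in full; the proofs are below) =====
def Claim_equal_execute : Prop := ∀ (even_increase : Int) (odd_decrease : Int) (zero_set : Int) (prevals : List String) (postvals : List String), Dom_execute even_increase odd_decrease zero_set prevals postvals → Pre_execute even_increase odd_decrease zero_set prevals postvals → Spec_execute even_increase odd_decrease zero_set prevals postvals (execute even_increase odd_decrease zero_set prevals postvals)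

-- ===== LEMMAS AND PROOFS =====

-- "".join: joining with the empty separator is concatenation
theorem chars_join_empty (css : List (List Char)) : PySem.Chars.join [] css = css.flatten := by
  induction css with
  | nil => simp [PySem.Chars.join_nil]
  | cons p rest ih =>
    cases rest with
    | nil => simp [PySem.Chars.join_singleton]
    | cons q r =>
      rw [PySem.Chars.join_cons_cons]
      simp at ih ⊢
      simp [ih]

-- A's character loop (string +=) equals "".join of the per-char strings
theorem foldl_str_append (f : Char → String) (l : List Char) (s : String) :
    l.foldl (fun cp c => cp ++ f c) s = s ++ PySem.Str.join "" (l.map f) := by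
  induction l generalizing s with
  | nil =>
    apply String.toList_inj.mp
    simp [PySem.Str.join]
  | cons c cs ih =>
    simp only [List.foldl_cons, ih]
    apply String.toList_inj.mp
    simp [PySem.Str.join, chars_join_empty, String.toList_append]

-- B's verification scan succeeds exactly when rest is the concatenation of the pieces
theorem pvMatches_iff_eq (ei od zs : Int) (cs : List Char) : ∀ (rest : String),
    pvMatches ei od zs rest cs
      = (rest.toList == (cs.map (fun c => (pvPiece ei od zs c).toList)).flatten) := by
  induction cs with
  | nil =>
    intro rest
    simp only [pvMatches, List.map_nil, List.flatten_nil]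
    rw [Bool.eq_iff_iff, beq_iff_eq, beq_iff_eq]
    constructor
    · intro h; rw [h]; rfl
    · intro h; exact String.toList_inj.mp (by simpa using h)
  | cons c cs ih =>
    intro rest
    simp only [pvMatches, List.map_cons, List.flatten_cons]
    by_cases hpre : (pvPiece ei od zs c).toList <+: rest.toList
    · have hsw : PySem.Str.startswith rest (pvPiece ei od zs c) = true :=
        (PySem.Chars.startswith_iff _ _).mpr hpre
      rw [hsw, if_pos rfl, ih]
      obtain ⟨t, ht⟩ := hpre
      have hslice : (PySem.Str.slice rest (some (PySem.Str.len (pvPiece ei od zs c))) none).toList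
          = rest.toList.drop (pvPiece ei od zs c).toList.length := by
        simp [PySem.Str.len_eq, PySem.List.slice_from_natCast]
      have hdrop : rest.toList.drop (pvPiece ei od zs c).toList.length = t := by
        rw [← ht]; simp
      rw [hslice, hdrop]
      have hr : rest.toList = (pvPiece ei od zs c).toList ++ t := ht.symm
      rw [hr]
      simp
    · have hsw : PySem.Str.startswith rest (pvPiece ei od zs c) = false := by
        rw [← Bool.not_eq_true]
        intro h
        exact hpre ((PySem.Chars.startswith_iff _ _).mp h)
      rw [hsw]
      have hfr : (rest.toList ==
          (pvPiece ei od zs c).toList ++ (cs.map (fun c => (pvPiece ei od zs c).toList)).flatten)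
          = false := by
        rw [beq_eq_false_iff_ne]
        intro h
        exact hpre ⟨_, h.symm⟩
      rw [hfr]
      simp

-- hence ¬ matched ↔ the joined corrected string differs from postvals[i]
theorem not_pvMatches_iff (ei od zs : Int) (cs : List Char) (post : String) :
    (!pvMatches ei od zs post cs)
      = (PySem.Str.join "" (cs.map (pvPiece ei od zs)) != post) := by
  rw [pvMatches_iff_eq]
  have hJ : (PySem.Str.join "" (cs.map (pvPiece ei od zs))).toList
      = (cs.map (fun c => (pvPiece ei od zs c).toList)).flatten := by
    simp [PySem.Str.join, chars_join_empty, Function.comp_def]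
  rw [Bool.eq_iff_iff]
  simp only [Bool.not_eq_eq_eq_not, Bool.not_true, beq_eq_false_iff_ne, ne_eq, bne_iff_ne]
  constructor
  · intro h hEq; exact h (by rw [← hEq, hJ])
  · intro h hEq; exact h (String.toList_inj.mp (by rw [hJ, ← hEq]))

-- the comma loop of build_fail_output, seen over (index, value) pairs
theorem build_loop (L : Int) (fs : List Int) : ∀ (s : Int) (out : String), fs ≠ [] → s + fs.length = L →
    (PySem.List.enumerate fs s).foldl
      (fun out p => out ++ PySem.Int.toStr p.2 ++ (if p.1 != L - 1 then "," else "")) out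
    = out ++ PySem.Str.join "," (fs.map PySem.Int.toStr) := by
  induction fs with
  | nil => simp
  | cons x xs ih =>
    intro s out _ hL
    rw [PySem.List.enumerate_cons, List.foldl_cons]
    cases xs with
    | nil =>
      have : (s != L - 1) = false := by simp at hL ⊢; omega
      rw [this]
      apply String.toList_inj.mp
      simp [PySem.Str.join, PySem.Chars.join_singleton, String.toList_append]
    | cons y ys =>
      have hs : (s != L - 1) = true := by simp at hL ⊢; omega
      rw [hs, ih (s+1) _ (by simp) (by simp at hL ⊢; omega)]
      apply String.toList_inj.mp
      simp only [List.map_cons, PySem.Str.join, PySem.Chars.join_cons_cons, String.toList_append,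
        String.toList_ofList, List.append_assoc]
      simp

-- build_fail_output on a nonempty list equals 'FAIL: ' + ','.join(map(str, fails))
theorem build_fail_output_eq (fs : List Int) (h : fs ≠ []) :
    build_fail_output fs = "FAIL: " ++ PySem.Str.join "," (fs.map PySem.Int.toStr) := by
  have key := build_loop (fs.length : Int) fs 0 "FAIL: " h (by simp)
  rw [PySem.List.enumerate_eq_map_pyRange fs 0, List.foldl_map] at key
  unfold build_fail_output
  simpa using key

-- ===== VERDICT (by name: the statement is the Claim_ definition above) =====
theorem execute_spec : Claim_equal_execute := by
  intro ei od zs prevals postvals _ hpre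
  obtain ⟨hdig', hlen⟩ := hpre
  show execute ei od zs prevals postvals = execute_alt ei od zs prevals postvals
  -- A's per-string corrected value equals the join of B's pieces
  have corrA : ∀ s : String,
      s.toList.foldl (fun correct_preval char =>
        let char_int : Int := (PySem.Int.ofChars? [char]).getD 0
        let new_char : Int :=
          if char_int == 0 then zs
          else if PySem.Int.mod char_int 2 == 0 then char_int + ei
          else max (char_int - od) 0
        correct_preval ++ PySem.Int.toStr new_char) ""
      = PySem.Str.join "" (s.toList.map (pvPiece ei od zs)) := by
    intro s
    have := foldl_str_append (fun char =>
      let char_int : Int := (PySem.Int.ofChars? [char]).getD 0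
      PySem.Int.toStr (if char_int == 0 then zs
        else if PySem.Int.mod char_int 2 == 0 then char_int + ei
        else max (char_int - od) 0)) s.toList ""
    rw [show (fun (correct_preval : String) (char : Char) =>
        let char_int : Int := (PySem.Int.ofChars? [char]).getD 0
        let new_char : Int :=
          if char_int == 0 then zs
          else if PySem.Int.mod char_int 2 == 0 then char_int + ei
          else max (char_int - od) 0
        correct_preval ++ PySem.Int.toStr new_char)
      = (fun (cp : String) (char : Char) => cp ++ (fun char =>
          let char_int : Int := (PySem.Int.ofChars? [char]).getD 0
          PySem.Int.toStr (if char_int == 0 then zs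
            else if PySem.Int.mod char_int 2 == 0 then char_int + ei
            else max (char_int - od) 0)) char) from rfl, this]
    have hp : (fun char =>
        let char_int : Int := (PySem.Int.ofChars? [char]).getD 0
        PySem.Int.toStr (if char_int == 0 then zs
          else if PySem.Int.mod char_int 2 == 0 then char_int + ei
          else max (char_int - od) 0)) = pvPiece ei od zs := by
      funext c
      simp only [pvPiece]
      split_ifs <;> rfl
    rw [hp]
    apply String.toList_inj.mp
    simp [PySem.Str.join]
  simp only [execute, execute_alt, PySem.List.foldl_append_singleton_eq_map, List.nil_append]
  rw [List.map_congr_left (fun s _ => corrA s)]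
  -- A's mismatch loop as a filtered-mapped range
  rw [PySem.List.foldl_append_if
    (fun i => PySem.List.pyGetD (prevals.map (fun s => PySem.Str.join "" (s.toList.map (pvPiece ei od zs)))) i ""
        != PySem.List.pyGetD postvals i "") (fun i => i + 1)]
  simp only [List.nil_append, PySem.List.len_eq, List.length_map]
  -- B's filter over enumerate as a filter over the range
  rw [PySem.List.enumerate_eq_map_pyRange prevals "", List.filter_map, List.map_map]
  simp only [Function.comp_def, PySem.List.len_eq]
  have hfil : (PySem.List.pyRange 0 (prevals.length : Int) 1).filter
      (fun i => PySem.List.pyGetD (prevals.map (fun s => PySem.Str.join "" (s.toList.map (pvPiece ei od zs)))) i ""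
          != PySem.List.pyGetD postvals i "")
    = (PySem.List.pyRange 0 (prevals.length : Int) 1).filter
      (fun x => !pvMatches ei od zs (PySem.List.pyGetD postvals x "") (PySem.List.pyGetD prevals x "").toList) := by
    apply List.filter_congr
    intro i hi
    rcases PySem.List.mem_pyRange_one.mp hi with ⟨h0, h1⟩
    rw [PySem.List.pyGetD_eq_getElem (prevals.map (fun s => PySem.Str.join "" (s.toList.map (pvPiece ei od zs)))) "" h0 (by simpa using h1),
        not_pvMatches_iff,
        PySem.List.pyGetD_eq_getElem prevals "" h0 (by simpa using h1)]
    simp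
  rw [hfil]
  have hsorted : PySem.List.sorted
      (((PySem.List.pyRange 0 (prevals.length : Int) 1).filter
        (fun x => !pvMatches ei od zs (PySem.List.pyGetD postvals x "") (PySem.List.pyGetD prevals x "").toList)).map
        (fun i => i + 1)) id false
    = ((PySem.List.pyRange 0 (prevals.length : Int) 1).filter
        (fun x => !pvMatches ei od zs (PySem.List.pyGetD postvals x "") (PySem.List.pyGetD prevals x "").toList)).map
        (fun i => i + 1) := by
    apply PySem.List.sorted_eq_of_perm_of_pairwise_lt _ _ id (List.Perm.refl _)
    rw [List.pairwise_map]
    exact (PySem.List.pairwise_lt_pyRange_one 0 _).filter _ |>.imp (by intro a b h; simpa using h)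
  rw [hsorted]
  generalize ((PySem.List.pyRange 0 (prevals.length : Int) 1).filter
      (fun x => !pvMatches ei od zs (PySem.List.pyGetD postvals x "") (PySem.List.pyGetD prevals x "").toList)) = fl
  by_cases hf : fl = []
  · simp [hf]
  · have h1 : ¬ (((((fl.map (fun i => i + 1)).length : Nat) : Int) == 0) = true) := by
      simp [hf]
    have h2 : ¬ ((fl.map (fun x => PySem.Int.toStr (x + 1))).isEmpty = true) := by
      simp [hf]
    rw [if_neg h1, if_neg h2, build_fail_output_eq _ (by simp [hf])]
    congr 1
    simp [List.map_map, Function.comp_def]
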